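-- pv_equiv track=rewrite | github.com/Jneck/Algorithm | 프로그래머스/lv2/87390. n＾2 배열 자르기/n＾2 배열 자르기.py | solution
-- ===== SOURCE A (Python) =====
-- def solution(n, left, right):
--     answer = []
--     # 1차원 배열 규칙. 1 1개 + 234~~~, 2 2개 345~~~, 3 3개 456 ~~, 4 4개 567~~~, ~~~
--
--     # arr을 위 규칙에 맞게 필요한 부분만 제작
--     for i in range(left//n, right//n+1):
--         for j in range(n):
--             # 위 규칙에 맞게 if else문 제작
--             if j <= i:
--                 answer.append(i+1)
--             else:
--                 answer.append(j+1)
--     # 필요한 부분 행 위치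
--     loc = left%n
--     return answer[loc: loc + (right-left+1)]
-- ===== SOURCE B (Python) =====
-- def solution(n, left, right):
--     return [max(divmod(k, n)) + 1 for k in range(left, right + 1)]
-- ===== Notes on version B (the rewrite author's own statement) =====
-- stated objective: simpler
-- what changed: A builds every full row from left//n to right//n with a nested row/column loop and then slices off the overhang; B computes each output element directly from its flat index k as max(k//n, k%n)+1 over range(left, right+1), with no intermediate array and no slice.
-- outside the precondition, e.g. on solution(0, 0, 3): A raises ZeroDivisionError, B raises ZeroDivisionError; on solution(-4, -8, -8): A returns [], B returns [3]
import Mathlib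
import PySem

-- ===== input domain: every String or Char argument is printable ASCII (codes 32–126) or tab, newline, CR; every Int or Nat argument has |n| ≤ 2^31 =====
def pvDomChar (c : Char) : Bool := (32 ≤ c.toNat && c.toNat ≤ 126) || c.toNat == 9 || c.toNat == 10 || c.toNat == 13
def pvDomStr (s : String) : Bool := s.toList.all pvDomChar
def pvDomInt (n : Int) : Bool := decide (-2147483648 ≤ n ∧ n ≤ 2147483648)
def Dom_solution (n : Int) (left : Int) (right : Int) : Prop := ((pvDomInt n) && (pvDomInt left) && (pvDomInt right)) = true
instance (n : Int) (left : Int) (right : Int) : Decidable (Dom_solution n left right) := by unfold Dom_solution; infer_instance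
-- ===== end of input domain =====

-- B replaces A's build-all-rows-then-slice scheme by the direct index→value formula
-- max(k//n, k%n)+1 over the requested flat indices; objective: simpler.

-- ===== PORT A =====
def solution (n : Int) (left : Int) (right : Int) : List Int :=
  let answer : List Int :=
    (PySem.List.pyRange (PySem.Int.floordiv left n) (PySem.Int.floordiv right n + 1) 1).foldl
      (fun answer i =>
        (PySem.List.pyRange 0 n 1).foldl
          (fun answer j => answer ++ [if j ≤ i then i + 1 else j + 1]) answer)
      []
  let loc := PySem.Int.mod left n
  PySem.List.slice answer (some loc) (some (loc + (right - left + 1)))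

-- ===== PORT B =====
def solution_alt (n : Int) (left : Int) (right : Int) : List Int :=
  (PySem.List.pyRange left (right + 1) 1).map
    (fun k => max (PySem.Int.floordiv k n) (PySem.Int.mod k n) + 1)

-- ===== PRECONDITION & SPEC =====
-- Pre_ restricts to the task's natural domain n ≥ 1 (n is the side length of the n×n array):
-- at n = 0 A raises ZeroDivisionError, and for n < 0 A's inner loop over range(n) is empty, so
-- A returns a slice of an accidental answer list — an artefact outside the problem's domain.
def Pre_solution (n : Int) (left : Int) (right : Int) : Prop := 1 ≤ n
instance (n : Int) (left : Int) (right : Int) : Decidable (Pre_solution n left right) := by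
  unfold Pre_solution; infer_instance
def pvWitness_solution : Int × Int × Int := (3, 2, 5)

def Spec_solution (n : Int) (left : Int) (right : Int) (out : List Int) : Prop := out = solution_alt n left right
instance (n : Int) (left : Int) (right : Int) (out : List Int) : Decidable (Spec_solution n left right out) := by unfold Spec_solution; infer_instance

-- ===== CLAIM (what is proved, stated in full; the proofs are below) =====
def Claim_equal_solution : Prop := ∀ (n : Int) (left : Int) (right : Int), Dom_solution n left right → Pre_solution n left right → Spec_solution n left right (solution n left right)

-- ===== LEMMAS AND PROOFS =====

-- dropping from / taking of an integer range shifts its bounds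
theorem drop_pyRange (b : Int) (k : Nat) : ∀ (a : Int), (k : Int) ≤ b - a →
    (PySem.List.pyRange a b 1).drop k = PySem.List.pyRange (a + k) b 1 := by
  induction k with
  | zero => intro a _; simp
  | succ m ih =>
    intro a h
    rw [PySem.List.pyRange_one_cons (by omega), List.drop_succ_cons, ih (a + 1) (by push_cast at h ⊢; omega)]
    congr 1; push_cast; ring

theorem take_pyRange (b : Int) (k : Nat) : ∀ (a : Int), (k : Int) ≤ b - a →
    (PySem.List.pyRange a b 1).take k = PySem.List.pyRange a (a + k) 1 := by
  induction k with
  | zero =>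
    intro a _
    simp only [Nat.cast_zero, add_zero, List.take_zero]
    exact (PySem.List.pyRange_one_eq_nil (by omega)).symm
  | succ m ih =>
    intro a h
    rw [PySem.List.pyRange_one_cons (show a < b by omega), List.take_succ_cons,
        ih (a + 1) (by push_cast at h ⊢; omega),
        PySem.List.pyRange_one_cons (show a < a + ((m + 1 : Nat) : Int) by push_cast; omega)]
    congr 2
    push_cast; ring

-- the value formula: row i, column j holds max i j + 1, and flat index i*n + j decomposes back
theorem floordiv_row (n i j : Int) (hn : 0 < n) (h0 : 0 ≤ j) (hj : j < n) :
    PySem.Int.floordiv (i * n + j) n = i ∧ PySem.Int.mod (i * n + j) n = j := by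
  have hq : PySem.Int.floordiv (i * n + j) n = i := by
    rw [PySem.Int.floordiv_eq_iff_of_pos]
    · constructor
      · linarith
      · nlinarith
    · exact hn
  refine ⟨hq, ?_⟩
  have h2 := PySem.Int.floordiv_mul_add_mod (i * n + j) n
  rw [hq] at h2
  linarith

-- one inner row-loop of A produces exactly the map of the index formula over the row's flat indices
theorem row_eq (n i : Int) (hn : 0 < n) (acc : List Int) :
    (PySem.List.pyRange 0 n 1).foldl
        (fun answer j => answer ++ [if j ≤ i then i + 1 else j + 1]) acc
      = acc ++ (PySem.List.pyRange (i * n) ((i + 1) * n) 1).map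
          (fun k => max (PySem.Int.floordiv k n) (PySem.Int.mod k n) + 1) := by
  rw [PySem.List.foldl_append_singleton_eq_map]
  congr 1
  rw [PySem.List.pyRange_one 0 n, PySem.List.pyRange_one (i * n) ((i + 1) * n),
      show (i + 1) * n - i * n = n - 0 from by ring, List.map_map, List.map_map]
  refine List.map_congr_left ?_
  intro k hk
  have hkn : (k : Int) < n := by
    have h1 := List.mem_range.mp hk
    omega
  simp only [Function.comp_apply]
  obtain ⟨hq, hr⟩ := floordiv_row n i (k : Int) hn (Int.natCast_nonneg k) hkn
  rw [hq, hr]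
  split_ifs with h
  · rw [max_eq_left (by omega)]
  · rw [max_eq_right (by omega)]
    omega

-- the whole answer list is the map of the index formula over all covered rows' flat indices
theorem rows_eq (n : Int) (hn : 0 < n) (m : Nat) : ∀ (a b : Int), (b - a).toNat = m → ∀ (acc : List Int),
    (PySem.List.pyRange a b 1).foldl
        (fun answer i =>
          (PySem.List.pyRange 0 n 1).foldl
            (fun answer j => answer ++ [if j ≤ i then i + 1 else j + 1]) answer) acc
      = acc ++ (PySem.List.pyRange (a * n) (b * n) 1).map
          (fun k => max (PySem.Int.floordiv k n) (PySem.Int.mod k n) + 1) := by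
  induction m with
  | zero =>
    intro a b hm acc
    have hba : b ≤ a := by omega
    rw [PySem.List.pyRange_one_eq_nil hba,
        PySem.List.pyRange_one_eq_nil (mul_le_mul_of_nonneg_right hba hn.le)]
    simp
  | succ m ih =>
    intro a b hm acc
    have hab : a < b := by omega
    rw [PySem.List.pyRange_one_cons hab, List.foldl_cons, row_eq n a hn acc,
        ih (a + 1) b (by omega),
        show PySem.List.pyRange (a * n) (b * n) 1
           = PySem.List.pyRange (a * n) ((a + 1) * n) 1 ++ PySem.List.pyRange ((a + 1) * n) (b * n) 1
         from PySem.List.pyRange_one_append (a * n) ((a + 1) * n) (b * n)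
                (by nlinarith) (mul_le_mul_of_nonneg_right (by omega) hn.le),
        List.map_append, List.append_assoc]

-- ===== VERDICT (by name: the statement is the Claim_ definition above) =====
theorem solution_spec : Claim_equal_solution := by
  intro n left right _ hpre
  have hn : 0 < n := hpre
  unfold Spec_solution solution solution_alt
  set L0 := PySem.Int.floordiv left n with hL0
  set R0 := PySem.Int.floordiv right n with hR0
  set loc := PySem.Int.mod left n with hloc
  have hld : L0 * n + loc = left := PySem.Int.floordiv_mul_add_mod left n
  have hlb : L0 * n ≤ left ∧ left < (L0 + 1) * n :=
    (PySem.Int.floordiv_eq_iff_of_pos hn).mp hL0.symm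
  have hrb : R0 * n ≤ right ∧ right < (R0 + 1) * n :=
    (PySem.Int.floordiv_eq_iff_of_pos hn).mp hR0.symm
  have hme : PySem.Int.mod left n = left % n := PySem.Int.mod_eq_emod_of_pos hn
  have hloc0 : 0 ≤ loc := by rw [hloc, hme]; exact Int.emod_nonneg _ (by omega)
  have hlocn : loc < n := by rw [hloc, hme]; exact Int.emod_lt_of_pos _ hn
  rw [rows_eq n hn (R0 + 1 - L0).toNat L0 (R0 + 1) rfl [], List.nil_append]
  by_cases hlr : left ≤ right
  · -- main case: the requested slice is exactly the flat indices left..right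
    have hLR : L0 ≤ R0 := by
      rcases le_or_gt L0 R0 with h | h
      · exact h
      · have := mul_le_mul_of_nonneg_right (show R0 + 1 ≤ L0 by omega) hn.le
        linarith [hlb.1, hrb.2]
    have hstop0 : 0 ≤ loc + (right - left + 1) := by omega
    have hcl : ((loc.toNat : Nat) : Int) = loc := Int.toNat_of_nonneg hloc0
    have hcs : (((loc + (right - left + 1)).toNat : Nat) : Int) = loc + (right - left + 1) :=
      Int.toNat_of_nonneg hstop0
    have hmn : loc.toNat ≤ (loc + (right - left + 1)).toNat := by omega
    have hkey : (L0 + 1) * n ≤ (R0 + 1) * n := mul_le_mul_of_nonneg_right (by omega) hn.le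
    rw [PySem.List.slice_toNat _ hloc0 hstop0, ← List.map_drop, ← List.map_take,
        drop_pyRange ((R0 + 1) * n) loc.toNat (L0 * n) (by rw [hcl]; nlinarith [hkey, hlocn]),
        take_pyRange ((R0 + 1) * n) ((loc + (right - left + 1)).toNat - loc.toNat)
          (L0 * n + (loc.toNat : Int))
          (by rw [Int.natCast_sub hmn, hcl, hcs]; linarith [hrb.2, hld]),
        Int.natCast_sub hmn, hcl, hcs, hld,
        show left + (loc + (right - left + 1) - loc) = right + 1 from by ring]
  · -- left > right: both sides are empty
    rw [PySem.List.pyRange_one_eq_nil (show right + 1 ≤ left by omega), List.map_nil]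
    by_cases hLR : L0 ≤ R0
    · have hmul := mul_le_mul_of_nonneg_right hLR hn.le
      have hstop0 : 0 ≤ loc + (right - left + 1) := by linarith [hrb.1, hld]
      rw [PySem.List.slice_toNat _ hloc0 hstop0, List.take_eq_nil_iff]
      exact Or.inl (by omega)
    · rw [PySem.List.pyRange_one_eq_nil
            (mul_le_mul_of_nonneg_right (show R0 + 1 ≤ L0 by omega) hn.le), List.map_nil]
      simp [PySem.List.slice]
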